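-- pv_equiv track=rewrite | github.com/suresh-vuppala/interview-ignite-lab | src/data/courses/dsa/two-pointers-sliding-window/sliding-window-variable-longest/max-sum-subarray-not-greater-m/code/python/max_sum_not_greater_m.py | max_sum_brute
-- ===== SOURCE A (Python) =====
-- def max_sum_brute(arr, M):
--     n = len(arr)
--     max_sum = 0
--
--     # Check all subarrays
--     for i in range(n):
--         for j in range(i, n):
--             # Calculate sum of subarray [i...j]
--             current_sum = sum(arr[i:j+1])
--             if current_sum <= M:
--                 max_sum = max(max_sum, current_sum)
--
--     return max_sum
-- ===== SOURCE B (Python) =====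
-- def max_sum_brute(arr, M):
--     # Prefix sums: subarray sum arr[i..j] = pref[j+1] - pref[i].
--     # One pass over ends; inner scan over stored prefix sums replaces per-subarray summation.
--     best = 0
--     pref = 0
--     prefs = [0]
--     for x in arr:
--         pref += x
--         for s in prefs:
--             d = pref - s
--             if d <= M and d > best:
--                 best = d
--         prefs.append(pref)
--     return best
-- ===== Notes on version B (the rewrite author's own statement) =====
-- stated objective: faster
-- what changed: Replaces the O(n^3) enumerate-every-subarray-and-re-sum brute force by a prefix-sum algorithm: one pass over subarray ends keeps the running prefix sum and a list of all earlier prefix sums, and each end is compared against those stored prefixes (subarray sum = difference of two prefix sums), eliminating the per-subarray summation.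
import Mathlib
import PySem

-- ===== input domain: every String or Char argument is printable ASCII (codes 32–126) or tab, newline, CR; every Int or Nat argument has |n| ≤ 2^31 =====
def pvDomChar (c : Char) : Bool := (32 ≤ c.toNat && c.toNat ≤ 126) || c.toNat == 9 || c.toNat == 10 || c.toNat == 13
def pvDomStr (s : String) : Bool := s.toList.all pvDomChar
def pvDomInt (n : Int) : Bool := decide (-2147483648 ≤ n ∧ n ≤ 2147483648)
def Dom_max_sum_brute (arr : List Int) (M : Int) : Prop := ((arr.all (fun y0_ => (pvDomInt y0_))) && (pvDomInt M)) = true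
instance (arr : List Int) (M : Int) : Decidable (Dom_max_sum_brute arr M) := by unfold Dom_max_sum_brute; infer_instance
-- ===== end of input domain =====

-- B replaces A's O(n^3) re-summation of every subarray by a one-pass prefix-sum scheme (O(n^2)): faster.

-- ===== PORT A =====
-- Literal port of A: for i in range(n): for j in range(i, n): current_sum = sum(arr[i:j+1]); if current_sum <= M: max_sum = max(max_sum, current_sum)
def max_sum_brute (arr : List Int) (M : Int) : Int :=
  let n : Int := PySem.List.len arr
  (PySem.List.pyRange 0 n 1).foldl (fun max_sum i =>
    (PySem.List.pyRange i n 1).foldl (fun max_sum j =>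
      let current_sum := (PySem.List.slice arr (some i) (some (j + 1))).sum
      if current_sum ≤ M then max max_sum current_sum else max_sum) max_sum) 0

-- ===== PORT B =====
-- One iteration of B's 'for x in arr' loop; state = (best, pref, prefs).
def pvStepB (M : Int) (st : Int × Int × List Int) (x : Int) : Int × Int × List Int :=
  let pref := st.2.1 + x
  let best := st.2.2.foldl (fun b s =>
    let d := pref - s
    if d ≤ M ∧ b < d then d else b) st.1
  (best, pref, st.2.2 ++ [pref])

def max_sum_brute_alt (arr : List Int) (M : Int) : Int :=
  (arr.foldl (pvStepB M) (0, 0, [0])).1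

-- ===== PRECONDITION & SPEC =====
def Spec_max_sum_brute (arr : List Int) (M : Int) (out : Int) : Prop := out = max_sum_brute_alt arr M
instance (arr : List Int) (M : Int) (out : Int) : Decidable (Spec_max_sum_brute arr M out) := by unfold Spec_max_sum_brute; infer_instance

-- ===== CLAIM (what is proved, stated in full; the proofs are below) =====
def Claim_equal_max_sum_brute : Prop := ∀ (arr : List Int) (M : Int), Dom_max_sum_brute arr M → Spec_max_sum_brute arr M (max_sum_brute arr M)

-- ===== LEMMAS AND PROOFS =====

-- The common max-update: fold body of both programs.
def pvG (M b v : Int) : Int := if v ≤ M then max b v else b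

-- Prefix sum of the first k elements.
def pvP (arr : List Int) (k : Nat) : Int := (arr.take k).sum

-- A's candidate sums, grouped by start index i (inner index k = j - i).
def pvLA (arr : List Int) : List Int :=
  (List.range arr.length).flatMap (fun i =>
    (List.range (arr.length - i)).map (fun k => pvP arr (i + k + 1) - pvP arr i))

-- B's candidate sums, grouped by end index k.
def pvLB (arr : List Int) : List Int :=
  (List.range arr.length).flatMap (fun k =>
    (List.range (k + 1)).map (fun i => pvP arr (k + 1) - pvP arr i))

lemma pvG_rc (M : Int) : RightCommutative (pvG M) := by
  constructor
  intro b x y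
  simp only [pvG]
  split_ifs <;> omega

lemma pv_foldl_flatMap {α β : Type} (l : List β) (f : β → List α) (g : Int → α → Int) (b : Int) :
    (l.flatMap f).foldl g b = l.foldl (fun b x => (f x).foldl g b) b := by
  induction l generalizing b with
  | nil => rfl
  | cons x t ih => simp [List.foldl_append, ih]

lemma pv_sum_drop_take (arr : List Int) (i m : Nat) :
    ((arr.drop i).take m).sum = pvP arr (i + m) - pvP arr i := by
  have h : arr.take (i + m) = arr.take i ++ (arr.drop i).take m := List.take_add
  have h2 : pvP arr (i + m) = pvP arr i + ((arr.drop i).take m).sum := by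
    simp [pvP, h]
  omega

lemma pv_flatMap_congr {α : Type} (l : List Nat) (f g : Nat → List α)
    (h : ∀ x ∈ l, f x = g x) : l.flatMap f = l.flatMap g := by
  induction l with
  | nil => rfl
  | cons x t ih =>
    simp only [List.flatMap_cons, h x (by simp), ih (fun y hy => h y (by simp [hy]))]

lemma pv_flatMap_map {α β γ : Type} (l : List α) (f : α → β) (g : β → List γ) :
    (l.map f).flatMap g = l.flatMap (fun x => g (f x)) := by
  induction l with
  | nil => rfl
  | cons x t ih => simp only [List.map_cons, List.flatMap_cons, ih]

-- A computes the pvG-fold of pvLA.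
lemma pvA_char (arr : List Int) (M : Int) :
    max_sum_brute arr M = (pvLA arr).foldl (pvG M) 0 := by
  unfold max_sum_brute pvLA
  rw [pv_foldl_flatMap]
  simp only [PySem.List.len_eq]
  rw [PySem.List.pyRange_one]
  simp only [sub_zero, Int.toNat_natCast, zero_add, List.foldl_map]
  apply PySem.List.foldl_congr_mem
  intro acc i hi
  rw [PySem.List.pyRange_one,
    show ((arr.length : Int) - (i : Int)).toNat = arr.length - i from by omega,
    List.foldl_map]
  apply PySem.List.foldl_congr_mem
  intro b k hk
  simp only [show ((i : Int) + (k : Int) + 1) = ((i + (k + 1) : Nat) : Int) from by push_cast; ring,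
    PySem.List.slice_natCast, show i + (k + 1) - i = k + 1 from by omega, pv_sum_drop_take]
  rfl

-- B's loop, fully characterized: state after folding t from (b, p, S).
lemma pvB_fold (M : Int) (t : List Int) : ∀ (b p : Int) (S : List Int),
    t.foldl (pvStepB M) (b, p, S) =
      ( ((List.range t.length).flatMap (fun k =>
          (S ++ (List.range k).map (fun i => p + (t.take (i + 1)).sum)).map
            (fun s => (p + (t.take (k + 1)).sum) - s))).foldl (pvG M) b,
        p + t.sum,
        S ++ (List.range t.length).map (fun i => p + (t.take (i + 1)).sum) ) := by
  induction t with
  | nil => intro b p S; simp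
  | cons x t ih =>
    intro b p S
    have hstep : pvStepB M (b, p, S) x
        = ((S.map (fun s => p + x - s)).foldl (pvG M) b, p + x, S ++ [p + x]) := by
      refine Prod.ext ?_ rfl
      show S.foldl _ b = _
      rw [List.foldl_map]
      apply PySem.List.foldl_congr_mem
      intro acc s _
      simp only [pvG, max_def]
      split_ifs <;> omega
    rw [List.foldl_cons, hstep, ih]
    simp only [Prod.mk.injEq]
    refine ⟨?_, ?_, ?_⟩
    · rw [← List.foldl_append]
      congr 1
      rw [show (x :: t).length = t.length + 1 from rfl, List.range_succ_eq_map,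
        List.flatMap_cons, pv_flatMap_map]
      congr 1
      · simp
      · apply pv_flatMap_congr
        intro k hk
        simp [List.range_succ_eq_map, List.map_map, Function.comp, List.take_succ_cons,
          add_assoc, List.append_assoc]
    · simp [add_assoc]
    · simp [List.range_succ_eq_map, List.map_map, Function.comp, List.take_succ_cons,
        add_assoc, List.append_assoc]

-- B computes the pvG-fold of pvLB.
lemma pvB_char (arr : List Int) (M : Int) :
    max_sum_brute_alt arr M = (pvLB arr).foldl (pvG M) 0 := by
  unfold max_sum_brute_alt pvLB
  rw [pvB_fold]
  show List.foldl (pvG M) 0 _ = List.foldl (pvG M) 0 _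
  congr 1
  apply pv_flatMap_congr
  intro k hk
  rw [List.range_succ_eq_map]
  simp [pvP, List.map_map, Function.comp]

lemma pv_perm_flatMap_append (l : List Nat) (a b : Nat → List Int) :
    (l.flatMap (fun x => a x ++ b x)).Perm (l.flatMap a ++ l.flatMap b) := by
  induction l with
  | nil => simp
  | cons x t ih =>
    simp only [List.flatMap_cons]
    refine ((ih.append_left (a x ++ b x)).trans ?_)
    have h1 : a x ++ b x ++ (t.flatMap a ++ t.flatMap b)
        = a x ++ (b x ++ (t.flatMap a ++ t.flatMap b)) := by simp [List.append_assoc]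
    have h2 : a x ++ t.flatMap a ++ (b x ++ t.flatMap b)
        = a x ++ (t.flatMap a ++ (b x ++ t.flatMap b)) := by simp [List.append_assoc]
    rw [h1, h2]
    exact List.Perm.append_left (a x) (List.perm_append_comm_assoc _ _ _)

-- Transposition: enumerating pairs i ≤ j by start i or by end j is a permutation.
lemma pv_transpose (f : Nat → Nat → Int) : ∀ n : Nat,
    ((List.range n).flatMap (fun i => (List.range (n - i)).map (fun k => f i (i + k)))).Perm
    ((List.range n).flatMap (fun j => (List.range (j + 1)).map (fun i => f i j))) := by
  intro n
  induction n with
  | zero => simp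
  | succ n ih =>
    have hL : (List.range (n + 1)).flatMap
          (fun i => (List.range (n + 1 - i)).map (fun k => f i (i + k)))
        = (List.range n).flatMap
            (fun i => ((List.range (n - i)).map (fun k => f i (i + k))) ++ [f i n]) ++ [f n n] := by
      rw [List.range_succ, List.flatMap_append]
      congr 1
      · apply pv_flatMap_congr
        intro i hi
        have hi' : i < n := List.mem_range.mp hi
        rw [show n + 1 - i = (n - i) + 1 from by omega, List.range_succ, List.map_append]
        simp [show i + (n - i) = n from by omega]
      · simp [show n + 1 - n = 1 from by omega]
    have hR : (List.range (n + 1)).flatMap (fun j => (List.range (j + 1)).map (fun i => f i j))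
        = (List.range n).flatMap (fun j => (List.range (j + 1)).map (fun i => f i j)) ++
            ((List.range n).map (fun i => f i n) ++ [f n n]) := by
      rw [List.range_succ, List.flatMap_append]
      congr 1
      simp [List.range_succ]
    rw [hL, hR]
    refine ((pv_perm_flatMap_append _ _ _).append_right [f n n]).trans ?_
    have hs : (List.range n).flatMap (fun i => ([f i n] : List Int))
        = (List.range n).map (fun i => f i n) := by
      induction List.range n with
      | nil => rfl
      | cons y t ihs => simp only [List.flatMap_cons, List.map_cons, ihs, List.singleton_append]
    rw [hs]
    have h2 := (ih.append_right ((List.range n).map (fun i => f i n))).append_right [f n n]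
    simpa [List.append_assoc] using h2

theorem pv_main (arr : List Int) (M : Int) :
    max_sum_brute arr M = max_sum_brute_alt arr M := by
  rw [pvA_char, pvB_char]
  have : RightCommutative (pvG M) := pvG_rc M
  exact List.Perm.foldl_eq (l₁ := pvLA arr) (l₂ := pvLB arr)
    (pv_transpose (fun i j => pvP arr (j + 1) - pvP arr i) arr.length) 0

-- ===== VERDICT (by name: the statement is the Claim_ definition above) =====
theorem max_sum_brute_spec : Claim_equal_max_sum_brute := by
  intro arr M _
  unfold Spec_max_sum_brute
  exact pv_main arr M
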